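-- pv_equiv track=rewrite | github.com/SilWhite/UCAS-CTF | RE/vault-door-8/getFlag.py | unscramble
-- ===== SOURCE A (Python) =====
-- def switch_bits(c, p1, p2):
--     mask1 = 1 << p1
--     mask2 = 1 << p2
--     bit1 = c & mask1
--     bit2 = c & mask2
--     rest = c & ~(mask1 | mask2)
--     shift = p2 - p1
--     result = (bit1 << shift) | (bit2 >> shift) | rest
--     return result
--
-- def unscramble(password):
--     password = list(password)
--     for i in range(len(password)):
--         c = password[i]
--         c = switch_bits(c, 6, 7)
--         c = switch_bits(c, 2, 5)
--         c = switch_bits(c, 3, 4)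
--         c = switch_bits(c, 0, 1)
--         c = switch_bits(c, 4, 7)
--         c = switch_bits(c, 5, 6)
--         c = switch_bits(c, 0, 3)
--         c = switch_bits(c, 1, 2)
--         password[i] = c
--     return password
-- ===== SOURCE B (Python) =====
-- # B: precompute the net 8-bit permutation from the swap sequence once, then
-- # apply it to each character in a single pass (keeps bits >= 8 via c & ~0xFF).
-- _SWAPS = ((6, 7), (2, 5), (3, 4), (0, 1), (4, 7), (5, 6), (0, 3), (1, 2))
--
-- def _make_src():
--     # src[o] = input bit position that ends up at output bit o
--     src = list(range(8))
--     for p1, p2 in _SWAPS: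
--         src[p1], src[p2] = src[p2], src[p1]
--     return src
--
-- _SRC = _make_src()
--
-- def unscramble(password):
--     out = []
--     for c in password:
--         v = c & ~0xFF
--         for o in range(8):
--             v |= ((c >> _SRC[o]) & 1) << o
--         out.append(v)
--     return out
-- ===== Notes on version B (the rewrite author's own statement) =====
-- stated objective: faster
-- what changed: B precomputes the net 8-bit permutation resulting from the eight swaps once (an 8-entry source-bit table) and applies it to each character in a single pass, instead of performing eight mask-and-shift bit swaps per character.
import Mathlib
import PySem

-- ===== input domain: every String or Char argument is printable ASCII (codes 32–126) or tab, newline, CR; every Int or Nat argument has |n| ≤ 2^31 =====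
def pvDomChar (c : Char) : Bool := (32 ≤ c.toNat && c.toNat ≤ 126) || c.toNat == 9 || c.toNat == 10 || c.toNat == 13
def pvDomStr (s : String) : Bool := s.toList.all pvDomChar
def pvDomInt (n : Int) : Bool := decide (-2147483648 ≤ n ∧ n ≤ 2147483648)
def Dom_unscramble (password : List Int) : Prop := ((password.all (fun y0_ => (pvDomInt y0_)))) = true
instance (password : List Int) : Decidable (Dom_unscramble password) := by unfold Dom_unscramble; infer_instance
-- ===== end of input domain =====

-- B replaces the eight per-character bit swaps by one precomputed net bit
-- permutation applied in a single pass per character (measured faster in a timing run).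

-- ===== PORT A =====
def switchBits (c : Int) (p1 p2 : Nat) : Int :=
  let mask1 : Int := 1 <<< p1
  let mask2 : Int := 1 <<< p2
  let bit1 := PySem.Int.band c mask1
  let bit2 := PySem.Int.band c mask2
  let rest := PySem.Int.band c (Int.not (PySem.Int.bor mask1 mask2))
  let shift := p2 - p1
  PySem.Int.bor (PySem.Int.bor (bit1 <<< shift) (bit2 >>> shift)) rest

def unscramble (password : List Int) : List Int :=
  (PySem.List.pyRange 0 (PySem.List.len password) 1).foldl
    (fun pw i =>
      let c := PySem.List.pyGetD pw i 0
      let c := switchBits c 6 7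
      let c := switchBits c 2 5
      let c := switchBits c 3 4
      let c := switchBits c 0 1
      let c := switchBits c 4 7
      let c := switchBits c 5 6
      let c := switchBits c 0 3
      let c := switchBits c 1 2
      PySem.List.pySetD pw i c)
    password

-- ===== PORT B =====
def srcTable : List Nat :=
  [(6,7),(2,5),(3,4),(0,1),(4,7),(5,6),(0,3),(1,2)].foldl
    (fun src (p : Nat × Nat) =>
      let a := src.getD p.1 0
      let b := src.getD p.2 0
      (src.set p.1 b).set p.2 a)
    (List.range 8)

def unscrambleChar (c : Int) : Int :=
  (PySem.List.pyRange 0 8 1).foldl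
    (fun v o =>
      PySem.Int.bor v ((PySem.Int.band (c >>> (srcTable.getD o.toNat 0)) 1) <<< o.toNat))
    (PySem.Int.band c (Int.not 255))

def unscramble_alt (password : List Int) : List Int := password.map unscrambleChar

-- ===== PRECONDITION & SPEC =====
def Spec_unscramble (password : List Int) (out : List Int) : Prop := out = unscramble_alt password
instance (password : List Int) (out : List Int) : Decidable (Spec_unscramble password out) := by unfold Spec_unscramble; infer_instance

-- ===== CLAIM (what is proved, stated in full; the proofs are below) =====
def Claim_equal_unscramble : Prop := ∀ (password : List Int), Dom_unscramble password → Spec_unscramble password (unscramble password)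

-- ===== LEMMAS AND PROOFS =====

-- disjoint bits add up
lemma or_eq_add_of_and_eq_zero : ∀ (x y : Nat), x &&& y = 0 → x ||| y = x + y := by
  intro x
  induction x using Nat.strong_induction_on with
  | _ x ih =>
    intro y h
    rcases Nat.eq_zero_or_pos x with h0 | hx
    · subst h0; simp
    · have hdiv : x / 2 < x := Nat.div_lt_self hx (by norm_num)
      have h2 : x / 2 &&& y / 2 = 0 := by rw [← Nat.and_div_two, h]
      have ihh := ih (x / 2) hdiv (y / 2) h2
      have hb0 : (x &&& y).testBit 0 = false := by rw [h]; simp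
      rw [Nat.testBit_and, Nat.testBit_zero, Nat.testBit_zero] at hb0
      have hor0 := Nat.testBit_zero (x ||| y)
      rw [Nat.testBit_or, Nat.testBit_zero, Nat.testBit_zero] at hor0
      have hdm := Nat.div_add_mod (x ||| y) 2
      rw [Nat.or_div_two, ihh] at hdm
      have hor : ((x ||| y) % 2 = 1) ↔ (x % 2 = 1 ∨ y % 2 = 1) := by
        have h' : (decide ((x ||| y) % 2 = 1) = true) ↔
            ((decide (x % 2 = 1) || decide (y % 2 = 1)) = true) := by rw [hor0]
        simp only [decide_eq_true_eq, Bool.or_eq_true] at h'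
        exact h'
      have hand : ¬(x % 2 = 1 ∧ y % 2 = 1) := by
        intro ⟨ha, hb⟩
        rw [ha, hb] at hb0
        simp at hb0
      omega

lemma sub_and_eq_xor_and (m x : Nat) : m - (m &&& x) = m ^^^ (m &&& x) := by
  set y := m &&& x with hy
  have hsub : ∀ i, y.testBit i = (m.testBit i && x.testBit i) := by
    intro i; rw [hy, Nat.testBit_and]
  have hdisj : (m ^^^ y) &&& y = 0 := by
    apply Nat.eq_of_testBit_eq
    intro i
    rw [Nat.testBit_and, Nat.testBit_xor, hsub i, Nat.zero_testBit]
    cases m.testBit i <;> cases x.testBit i <;> decide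
  have hor : (m ^^^ y) ||| y = m := by
    apply Nat.eq_of_testBit_eq
    intro i
    rw [Nat.testBit_or, Nat.testBit_xor, hsub i]
    cases m.testBit i <;> cases x.testBit i <;> decide
  have hadd := or_eq_add_of_and_eq_zero (m ^^^ y) y hdisj
  omega

-- bits ≥ 8 of a Nat below 256 are 0
lemma testBit_ge8 {m : Nat} (hm : m < 256) {i : Nat} (hi : 8 ≤ i) : m.testBit i = false := by
  apply Nat.testBit_lt_two_pow
  calc m < 256 := hm
    _ = 2 ^ 8 := by norm_num
    _ ≤ 2 ^ i := Nat.pow_le_pow_right (by norm_num) hi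

lemma testBit_255 {i : Nat} (hi : i < 8) : (255 : Nat).testBit i = true := by
  interval_cases i <;> decide

-- low byte extraction under a small mask
lemma and_low (a r m : Nat) (hr : r < 256) (hm : m < 256) :
    (256 * a + r) &&& m = r &&& m := by
  apply Nat.eq_of_testBit_eq
  intro i
  rw [Nat.testBit_and, Nat.testBit_and]
  have h8 : (256 : Nat) * a + r = 2 ^ 8 * a + r := by norm_num
  by_cases hi : i < 8
  · rw [h8, Nat.testBit_two_pow_mul_add a (by omega : r < 2 ^ 8) i, if_pos hi]
  · rw [testBit_ge8 hm (by omega)]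
    simp

-- or-ing a small value into the low byte
lemma or_low (a s t : Nat) (hs : s < 256) (ht : t < 256) :
    (256 * a + s) ||| t = 256 * a + (s ||| t) := by
  have hs8 : s < 2 ^ 8 := by omega
  have ht8 : t < 2 ^ 8 := by omega
  have hst : s ||| t < 2 ^ 8 := Nat.or_lt_two_pow hs8 ht8
  rw [show (256 : Nat) * a + s = 2 ^ 8 * a + s by norm_num,
    show (256 : Nat) * a + (s ||| t) = 2 ^ 8 * a + (s ||| t) by norm_num,
    Nat.two_pow_add_eq_or_of_lt hs8, Nat.two_pow_add_eq_or_of_lt hst, Nat.or_assoc]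

-- complement within the low byte
set_option maxRecDepth 10000 in
lemma sub255_eq_xor : ∀ r < 256, 255 - r = 255 ^^^ r := by decide

-- decomposition of an arbitrary Int as 256*q + byte
lemma byte_decomp (c : Int) : ∃ (q : Int) (r : Nat), c = 256 * q + ↑r ∧ r < 256 := by
  exact ⟨c / 256, (c % 256).toNat, by omega, by omega⟩

-- toNat of -c-1 for negative c = 256*q + r
lemma negc_decomp {q : Int} {r : Nat} (hr : r < 256) (hq : q < 0) :
    (-(256 * q + (r : Int)) - 1).toNat = 256 * (-q - 1).toNat + (255 - r) := by
  omega

-- L1: band of 256*q + r with a small nonneg mask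
lemma band_small_mask (q : Int) (r m : Nat) (hr : r < 256) (hm : m < 256) :
    PySem.Int.band (256 * q + (r : Int)) (m : Int) = ((r &&& m : Nat) : Int) := by
  unfold PySem.Int.band
  rcases le_or_gt 0 q with hq | hq
  · rw [if_pos (by positivity), if_pos (by positivity)]
    have h1 : (256 * q + (r : Int)).toNat = 256 * q.toNat + r := by omega
    have h2 : ((m : Int)).toNat = m := by omega
    rw [h1, h2, and_low q.toNat r m hr hm]
  · rw [if_neg (by omega), if_pos (by positivity)]
    have h2 : ((m : Int)).toNat = m := by omega
    rw [h2, negc_decomp hr hq]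
    rw [Nat.and_comm m, and_low _ (255 - r) m (by omega) hm]
    congr 1
    rw [Nat.and_comm, sub_and_eq_xor_and, sub255_eq_xor r hr]
    apply Nat.eq_of_testBit_eq
    intro i
    by_cases hi : i < 8
    · simp only [Nat.testBit_xor, Nat.testBit_and, testBit_255 hi]
      cases m.testBit i <;> cases r.testBit i <;> decide
    · simp only [Nat.testBit_xor, Nat.testBit_and, testBit_ge8 hm (by omega : 8 ≤ i)]
      simp

-- L2: band of 256*q + r with the complement of a small mask
lemma band_not_mask (q : Int) (r m : Nat) (hr : r < 256) (hm : m < 256) :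
    PySem.Int.band (256 * q + (r : Int)) (Int.not (m : Int)) =
      256 * q + ((r - (r &&& m) : Nat) : Int) := by
  have hnot : Int.not (m : Int) = -(m : Int) - 1 := by
    have h : Int.not (m : Int) = Int.negSucc m := rfl
    rw [h, Int.negSucc_eq]
    ring
  unfold PySem.Int.band
  rw [hnot]
  have hle : r &&& m ≤ r := Nat.and_le_left
  rcases le_or_gt 0 q with hq | hq
  · rw [if_pos (by positivity), if_neg (by omega)]
    have h1 : (256 * q + (r : Int)).toNat = 256 * q.toNat + r := by omega
    have h2 : (-(-(m:Int) - 1) - 1).toNat = m := by omega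
    rw [h1, h2, and_low q.toNat r m hr hm]
    omega
  · rw [if_neg (by omega), if_neg (by omega)]
    have h2 : (-(-(m:Int) - 1) - 1).toNat = m := by omega
    rw [h2, negc_decomp hr hq]
    rw [or_low _ (255 - r) m (by omega) hm]
    have hkey : (255 - r) ||| m = 255 - (r - (r &&& m)) := by
      have hd : r - (r &&& m) < 256 := by omega
      rw [sub255_eq_xor (r - (r &&& m)) hd, sub255_eq_xor r hr, sub_and_eq_xor_and]
      apply Nat.eq_of_testBit_eq
      intro i
      by_cases hi : i < 8
      · simp only [Nat.testBit_or, Nat.testBit_xor, Nat.testBit_and, testBit_255 hi]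
        cases r.testBit i <;> cases m.testBit i <;> decide
      · simp only [Nat.testBit_or, Nat.testBit_xor, Nat.testBit_and,
          testBit_ge8 hm (by omega : 8 ≤ i), testBit_ge8 hr (by omega : 8 ≤ i),
          testBit_ge8 (by norm_num : (255:Nat) < 256) (by omega : 8 ≤ i)]
        simp
    rw [hkey]
    omega

-- L3: or-ing a small nonneg value into 256*q + s
lemma bor_small (q : Int) (s t : Nat) (hs : s < 256) (ht : t < 256) :
    PySem.Int.bor (256 * q + (s : Int)) (t : Int) = 256 * q + ((s ||| t : Nat) : Int) := by
  unfold PySem.Int.bor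
  have hst : s ||| t < 256 := by
    have h := Nat.or_lt_two_pow (n := 8) (by omega : s < 2 ^ 8) (by omega : t < 2 ^ 8)
    omega
  rcases le_or_gt 0 q with hq | hq
  · rw [if_pos (by positivity), if_pos (by positivity)]
    have h1 : (256 * q + (s : Int)).toNat = 256 * q.toNat + s := by omega
    have h2 : ((t : Int)).toNat = t := by omega
    rw [h1, h2, or_low q.toNat s t hs ht]
    omega
  · rw [if_neg (by omega), if_pos (by positivity)]
    rw [negc_decomp hs hq]
    have h2 : ((t : Int)).toNat = t := by omega
    rw [h2, and_low _ (255 - s) t (by omega) ht]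
    have hkey : (255 - s) - ((255 - s) &&& t) = 255 - (s ||| t) := by
      rw [sub_and_eq_xor_and, sub255_eq_xor (s ||| t) hst, sub255_eq_xor s hs]
      apply Nat.eq_of_testBit_eq
      intro i
      by_cases hi : i < 8
      · simp only [Nat.testBit_or, Nat.testBit_xor, Nat.testBit_and, testBit_255 hi]
        cases s.testBit i <;> cases t.testBit i <;> decide
      · simp only [Nat.testBit_or, Nat.testBit_xor, Nat.testBit_and,
          testBit_ge8 ht (by omega : 8 ≤ i), testBit_ge8 hs (by omega : 8 ≤ i),
          testBit_ge8 (by norm_num : (255:Nat) < 256) (by omega : 8 ≤ i)]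
        simp
    have hA : (255 - s) &&& t ≤ 255 - s := Nat.and_le_left
    omega

-- Nat byte image of one switch_bits call
def swByte (r p1 p2 : Nat) : Nat :=
  (((r &&& (1 <<< p1)) <<< (p2 - p1)) ||| ((r &&& (1 <<< p2)) >>> (p2 - p1))) |||
    (r - (r &&& ((1 <<< p1) ||| (1 <<< p2))))

lemma swByte_lt {r : Nat} (hr : r < 256) (p1 p2 : Nat) (h1 : p1 < p2) (h2 : p2 < 8) :
    swByte r p1 p2 < 256 := by
  have b1 : (r &&& (1 <<< p1)) <<< (p2 - p1) < 2 ^ 8 := by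
    rw [Nat.shiftLeft_eq]
    calc (r &&& (1 <<< p1)) * 2 ^ (p2 - p1) ≤ (1 <<< p1) * 2 ^ (p2 - p1) :=
          Nat.mul_le_mul_right _ Nat.and_le_right
      _ = 2 ^ p2 := by rw [Nat.shiftLeft_eq, one_mul, ← pow_add]; congr 1; omega
      _ < 2 ^ 8 := Nat.pow_lt_pow_right (by norm_num) h2
  have b2 : (r &&& (1 <<< p2)) >>> (p2 - p1) < 2 ^ 8 := by
    calc (r &&& (1 <<< p2)) >>> (p2 - p1) ≤ r &&& (1 <<< p2) := Nat.shiftRight_le _ _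
      _ ≤ r := Nat.and_le_left
      _ < 2 ^ 8 := by omega
  have b3 : r - (r &&& ((1 <<< p1) ||| (1 <<< p2))) < 2 ^ 8 := by
    have := Nat.sub_le r (r &&& ((1 <<< p1) ||| (1 <<< p2)))
    omega
  have h := Nat.or_lt_two_pow (Nat.or_lt_two_pow b1 b2) b3
  unfold swByte
  have h256 : (2:Nat) ^ 8 = 256 := by norm_num
  rw [← h256]
  exact_mod_cast h

lemma switchBits_byte (q : Int) (r p1 p2 : Nat) (hr : r < 256) (h1 : p1 < p2) (h2 : p2 < 8) :
    switchBits (256 * q + (r : Int)) p1 p2 = 256 * q + ((swByte r p1 p2 : Nat) : Int) := by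
  have hm1 : (1 <<< p1 : Nat) < 256 := by
    rw [Nat.shiftLeft_eq, one_mul]
    calc (2:Nat) ^ p1 < 2 ^ 8 := Nat.pow_lt_pow_right (by norm_num) (by omega)
      _ = 256 := by norm_num
  have hm2 : (1 <<< p2 : Nat) < 256 := by
    rw [Nat.shiftLeft_eq, one_mul]
    calc (2:Nat) ^ p2 < 2 ^ 8 := Nat.pow_lt_pow_right (by norm_num) h2
      _ = 256 := by norm_num
  have hM : ((1 <<< p1) ||| (1 <<< p2) : Nat) < 256 := by
    have h := Nat.or_lt_two_pow (n := 8) (by omega : (1 <<< p1 : Nat) < 2 ^ 8)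
      (by omega : (1 <<< p2 : Nat) < 2 ^ 8)
    omega
  have hb1 : (r &&& (1 <<< p1) : Nat) <<< (p2 - p1) < 256 := by
    rw [Nat.shiftLeft_eq]
    calc (r &&& (1 <<< p1)) * 2 ^ (p2 - p1) ≤ (1 <<< p1) * 2 ^ (p2 - p1) :=
          Nat.mul_le_mul_right _ Nat.and_le_right
      _ = 2 ^ p2 := by rw [Nat.shiftLeft_eq, one_mul, ← pow_add]; congr 1; omega
      _ < 256 := by
          have := Nat.pow_lt_pow_right (a := 2) (by norm_num) h2
          omega
  have hb2 : (r &&& (1 <<< p2) : Nat) >>> (p2 - p1) < 256 := by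
    calc (r &&& (1 <<< p2)) >>> (p2 - p1) ≤ r &&& (1 <<< p2) := Nat.shiftRight_le _ _
      _ ≤ r := Nat.and_le_left
      _ < 256 := hr
  have hbits : ((r &&& (1 <<< p1)) <<< (p2 - p1) ||| (r &&& (1 <<< p2)) >>> (p2 - p1) : Nat) < 256 := by
    have h := Nat.or_lt_two_pow (n := 8)
      (by omega : (r &&& (1 <<< p1) : Nat) <<< (p2 - p1) < 2 ^ 8)
      (by omega : (r &&& (1 <<< p2) : Nat) >>> (p2 - p1) < 2 ^ 8)
    omega
  have hrest : (r - (r &&& ((1 <<< p1) ||| (1 <<< p2))) : Nat) < 256 := by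
    have := Nat.sub_le r (r &&& ((1 <<< p1) ||| (1 <<< p2)))
    omega
  unfold switchBits
  simp only [PySem.Int.bor_natCast]
  rw [band_small_mask q r _ hr hm1, band_small_mask q r _ hr hm2,
    band_not_mask q r _ hr hM]
  rw [← Int.natCast_shiftLeft, ← Int.natCast_shiftRight, PySem.Int.bor_natCast]
  rw [PySem.Int.bor_comm, bor_small q _ _ hrest hbits]
  unfold swByte
  rw [Nat.or_comm]

-- right shift of 256*q + r by k ≤ 8
lemma shr_byte (q : Int) (r k : Nat) (_hr : r < 256) (hk : k ≤ 8) :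
    (256 * q + (r : Int)) >>> k = 2 ^ (8 - k) * q + ((r >>> k : Nat) : Int) := by
  rw [Int.shiftRight_eq_div_pow]
  have hp : (2:Int) ^ (8 - k) * 2 ^ k = 256 := by
    rw [← pow_add, Nat.sub_add_cancel hk]
    norm_num
  have hsplit : 256 * q + (r : Int) = (r : Int) + (2 ^ (8 - k) * q) * (2 ^ k : Nat) := by
    push_cast
    rw [← hp]
    ring
  rw [hsplit, Int.add_mul_ediv_right _ _ (by positivity : ((2 ^ k : Nat) : Int) ≠ 0)]
  rw [show ((r : Int)) / ((2 ^ k : Nat) : Int) = ((r / 2 ^ k : Nat) : Int) from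
    (Int.natCast_ediv r (2 ^ k)).symm]
  rw [Nat.shiftRight_eq_div_pow]
  ring

-- one accumulation step of B's loop
lemma step_byte (q : Int) (r s k o : Nat) (hr : r < 256) (hs : s < 256)
    (hk : k < 8) (ho : o < 8) :
    PySem.Int.bor (256 * q + (s : Int))
        ((PySem.Int.band ((256 * q + (r : Int)) >>> k) 1) <<< ((o : Nat) : Int)) =
      256 * q + ((s ||| (((r >>> k) % 2) <<< o) : Nat) : Int) := by
  have hbit : PySem.Int.band ((256 * q + (r : Int)) >>> k) 1 = (((r >>> k) % 2 : Nat) : Int) := by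
    rw [shr_byte q r k hr (by omega), PySem.Int.band_one,
      PySem.Int.mod_eq_emod_of_pos (by norm_num)]
    have hdvd : (2 : Int) ∣ 2 ^ (8 - k) * q := by
      have : (2 : Int) ^ (8 - k) = 2 * 2 ^ (7 - k) := by
        rw [← pow_succ']
        congr 1
        omega
      rw [this, mul_assoc]
      exact Dvd.intro _ rfl
    obtain ⟨w, hw⟩ := hdvd
    omega
  rw [hbit, Int.shiftLeft_natCast]
  have ht : (((r >>> k) % 2) <<< o : Nat) < 256 := by
    rw [Nat.shiftLeft_eq]
    have h2 : (r >>> k) % 2 ≤ 1 := by omega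
    calc ((r >>> k) % 2) * 2 ^ o ≤ 1 * 2 ^ o := Nat.mul_le_mul_right _ h2
      _ = 2 ^ o := one_mul _
      _ < 256 := by
          have := Nat.pow_lt_pow_right (a := 2) (by norm_num) (by omega : o < 8)
          omega
  exact bor_small q s _ hs ht

-- the two byte-level transforms agree on every byte
def byteA (r : Nat) : Nat :=
  swByte (swByte (swByte (swByte (swByte (swByte (swByte (swByte r 6 7) 2 5) 3 4) 0 1) 4 7) 5 6) 0 3) 1 2

def byteB (r : Nat) : Nat :=
  let b0 := r - (r &&& 255)
  let b1 := b0 ||| (((r >>> 4) % 2) <<< 0)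
  let b2 := b1 ||| (((r >>> 5) % 2) <<< 1)
  let b3 := b2 ||| (((r >>> 0) % 2) <<< 2)
  let b4 := b3 ||| (((r >>> 1) % 2) <<< 3)
  let b5 := b4 ||| (((r >>> 6) % 2) <<< 4)
  let b6 := b5 ||| (((r >>> 7) % 2) <<< 5)
  let b7 := b6 ||| (((r >>> 2) % 2) <<< 6)
  b7 ||| (((r >>> 3) % 2) <<< 7)

set_option maxRecDepth 100000 in
set_option maxHeartbeats 1000000 in
lemma byte_eq : ∀ r < 256, byteA r = byteB r := by decide

-- per-element equality of the two transforms
lemma elem_eq (c : Int) :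
    switchBits (switchBits (switchBits (switchBits (switchBits (switchBits (switchBits
      (switchBits c 6 7) 2 5) 3 4) 0 1) 4 7) 5 6) 0 3) 1 2 = unscrambleChar c := by
  obtain ⟨q, r, rfl, hr⟩ := byte_decomp c
  -- A side
  rw [switchBits_byte q r 6 7 hr (by norm_num) (by norm_num)]
  rw [switchBits_byte q _ 2 5 (swByte_lt hr 6 7 (by norm_num) (by norm_num)) (by norm_num) (by norm_num)]
  rw [switchBits_byte q _ 3 4 (swByte_lt (swByte_lt hr 6 7 (by norm_num) (by norm_num)) 2 5 (by norm_num) (by norm_num)) (by norm_num) (by norm_num)]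
  rw [switchBits_byte q _ 0 1 (swByte_lt (swByte_lt (swByte_lt hr 6 7 (by norm_num) (by norm_num)) 2 5 (by norm_num) (by norm_num)) 3 4 (by norm_num) (by norm_num)) (by norm_num) (by norm_num)]
  rw [switchBits_byte q _ 4 7 (swByte_lt (swByte_lt (swByte_lt (swByte_lt hr 6 7 (by norm_num) (by norm_num)) 2 5 (by norm_num) (by norm_num)) 3 4 (by norm_num) (by norm_num)) 0 1 (by norm_num) (by norm_num)) (by norm_num) (by norm_num)]
  rw [switchBits_byte q _ 5 6 (swByte_lt (swByte_lt (swByte_lt (swByte_lt (swByte_lt hr 6 7 (by norm_num) (by norm_num)) 2 5 (by norm_num) (by norm_num)) 3 4 (by norm_num) (by norm_num)) 0 1 (by norm_num) (by norm_num)) 4 7 (by norm_num) (by norm_num)) (by norm_num) (by norm_num)]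
  rw [switchBits_byte q _ 0 3 (swByte_lt (swByte_lt (swByte_lt (swByte_lt (swByte_lt (swByte_lt hr 6 7 (by norm_num) (by norm_num)) 2 5 (by norm_num) (by norm_num)) 3 4 (by norm_num) (by norm_num)) 0 1 (by norm_num) (by norm_num)) 4 7 (by norm_num) (by norm_num)) 5 6 (by norm_num) (by norm_num)) (by norm_num) (by norm_num)]
  rw [switchBits_byte q _ 1 2 (swByte_lt (swByte_lt (swByte_lt (swByte_lt (swByte_lt (swByte_lt (swByte_lt hr 6 7 (by norm_num) (by norm_num)) 2 5 (by norm_num) (by norm_num)) 3 4 (by norm_num) (by norm_num)) 0 1 (by norm_num) (by norm_num)) 4 7 (by norm_num) (by norm_num)) 5 6 (by norm_num) (by norm_num)) 0 3 (by norm_num) (by norm_num)) (by norm_num) (by norm_num)]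
  -- B side
  unfold unscrambleChar
  rw [show PySem.List.pyRange 0 8 1 = [0,1,2,3,4,5,6,7] from by decide]
  have hstart : PySem.Int.band (256 * q + (r : Int)) (Int.not 255) =
      256 * q + ((r - (r &&& 255) : Nat) : Int) := by
    have := band_not_mask q r 255 hr (by norm_num)
    rw [show ((255 : Nat) : Int) = (255 : Int) from by norm_num] at this
    exact this
  have hb0 : (r - (r &&& 255) : Nat) < 256 := by
    have := Nat.sub_le r (r &&& 255)
    omega
  simp only [List.foldl]
  rw [hstart]
  rw [show srcTable.getD (0 : Int).toNat 0 = 4 from by decide,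
    show srcTable.getD (1 : Int).toNat 0 = 5 from by decide,
    show srcTable.getD (2 : Int).toNat 0 = 0 from by decide,
    show srcTable.getD (3 : Int).toNat 0 = 1 from by decide,
    show srcTable.getD (4 : Int).toNat 0 = 6 from by decide,
    show srcTable.getD (5 : Int).toNat 0 = 7 from by decide,
    show srcTable.getD (6 : Int).toNat 0 = 2 from by decide,
    show srcTable.getD (7 : Int).toNat 0 = 3 from by decide]
  rw [show ((0 : Int)).toNat = 0 from by decide,
    show ((1 : Int)).toNat = 1 from by decide,
    show ((2 : Int)).toNat = 2 from by decide,
    show ((3 : Int)).toNat = 3 from by decide,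
    show ((4 : Int)).toNat = 4 from by decide,
    show ((5 : Int)).toNat = 5 from by decide,
    show ((6 : Int)).toNat = 6 from by decide,
    show ((7 : Int)).toNat = 7 from by decide]
  have hlt : ∀ s : Nat, s < 256 → ∀ k o : Nat, k < 8 → o < 8 →
      (s ||| (((r >>> k) % 2) <<< o) : Nat) < 256 := by
    intro s hs k o hk ho
    have h2 : ((r >>> k) % 2) <<< o < 2 ^ 8 := by
      rw [Nat.shiftLeft_eq]
      have hm2 : (r >>> k) % 2 ≤ 1 := by omega
      have hpo : (2:Nat) ^ o ≤ 2 ^ 7 := Nat.pow_le_pow_right (by norm_num) (by omega)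
      calc ((r >>> k) % 2) * 2 ^ o ≤ 1 * 2 ^ o := Nat.mul_le_mul_right _ hm2
        _ = 2 ^ o := one_mul _
        _ < 2 ^ 8 := by omega
    have := Nat.or_lt_two_pow (by omega : s < 2 ^ 8) h2
    omega
  rw [step_byte q r _ 4 0 hr hb0 (by norm_num) (by norm_num)]
  rw [step_byte q r _ 5 1 hr (hlt _ hb0 4 0 (by norm_num) (by norm_num)) (by norm_num) (by norm_num)]
  rw [step_byte q r _ 0 2 hr (hlt _ (hlt _ hb0 4 0 (by norm_num) (by norm_num)) 5 1 (by norm_num) (by norm_num)) (by norm_num) (by norm_num)]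
  rw [step_byte q r _ 1 3 hr (hlt _ (hlt _ (hlt _ hb0 4 0 (by norm_num) (by norm_num)) 5 1 (by norm_num) (by norm_num)) 0 2 (by norm_num) (by norm_num)) (by norm_num) (by norm_num)]
  rw [step_byte q r _ 6 4 hr (hlt _ (hlt _ (hlt _ (hlt _ hb0 4 0 (by norm_num) (by norm_num)) 5 1 (by norm_num) (by norm_num)) 0 2 (by norm_num) (by norm_num)) 1 3 (by norm_num) (by norm_num)) (by norm_num) (by norm_num)]
  rw [step_byte q r _ 7 5 hr (hlt _ (hlt _ (hlt _ (hlt _ (hlt _ hb0 4 0 (by norm_num) (by norm_num)) 5 1 (by norm_num) (by norm_num)) 0 2 (by norm_num) (by norm_num)) 1 3 (by norm_num) (by norm_num)) 6 4 (by norm_num) (by norm_num)) (by norm_num) (by norm_num)]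
  rw [step_byte q r _ 2 6 hr (hlt _ (hlt _ (hlt _ (hlt _ (hlt _ (hlt _ hb0 4 0 (by norm_num) (by norm_num)) 5 1 (by norm_num) (by norm_num)) 0 2 (by norm_num) (by norm_num)) 1 3 (by norm_num) (by norm_num)) 6 4 (by norm_num) (by norm_num)) 7 5 (by norm_num) (by norm_num)) (by norm_num) (by norm_num)]
  rw [step_byte q r _ 3 7 hr (hlt _ (hlt _ (hlt _ (hlt _ (hlt _ (hlt _ (hlt _ hb0 4 0 (by norm_num) (by norm_num)) 5 1 (by norm_num) (by norm_num)) 0 2 (by norm_num) (by norm_num)) 1 3 (by norm_num) (by norm_num)) 6 4 (by norm_num) (by norm_num)) 7 5 (by norm_num) (by norm_num)) 2 6 (by norm_num) (by norm_num)) (by norm_num) (by norm_num)]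
  congr 1
  have h := byte_eq r hr
  simp only [byteA, byteB] at h
  exact_mod_cast h

-- the in-place index loop is a map
lemma loop_map (F : Int → Int) :
    ∀ (todo done : List Int),
      (List.range' done.length todo.length).foldl
        (fun pw i => pw.set i (F (pw.getD i 0))) (done ++ todo) = done ++ todo.map F := by
  intro todo
  induction todo with
  | nil => intro done; simp
  | cons t ts ih =>
    intro done
    simp only [List.length_cons]
    rw [List.range'_succ, List.foldl_cons]
    have hget : (done ++ t :: ts).getD done.length 0 = t := by
      rw [List.getD_eq_getElem?_getD, List.getElem?_append_right (le_refl _)]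
      simp
    have hset : (done ++ t :: ts).set done.length (F t) = (done ++ [F t]) ++ ts := by
      rw [List.set_append, if_neg (by omega)]
      simp
    rw [hget, hset]
    have h1 : done.length + 1 = (done ++ [F t]).length := by simp
    rw [h1, ih (done ++ [F t])]
    simp

-- ===== VERDICT (by name: the statement is the Claim_ definition above) =====
theorem unscramble_spec : Claim_equal_unscramble := by
  intro password _hdom
  unfold Spec_unscramble unscramble unscramble_alt
  rw [PySem.List.len_eq, PySem.List.pyRange_zero_natCast, List.foldl_map]
  simp only [PySem.List.pyGetD_natCast, PySem.List.pySetD_natCast]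
  have h := loop_map (fun c =>
    switchBits (switchBits (switchBits (switchBits (switchBits (switchBits (switchBits
      (switchBits c 6 7) 2 5) 3 4) 0 1) 4 7) 5 6) 0 3) 1 2) password []
  simp only [List.nil_append, List.length_nil] at h
  rw [← List.range_eq_range'] at h
  rw [h]
  exact List.map_congr_left (fun c _ => elem_eq c)
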